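-- pv_equiv track=rewrite | github.com/Kossit73/ecommerce | streamlit_app.py | _normalize_year_list
-- ===== SOURCE A (Python) =====
-- from typing import Any, Dict, Iterable, List, Optional, Sequence, Set, Tuple
--
-- def _normalize_year_list(years: Iterable[Any]) -> List[int]:
--     normalized: List[int] = []
--     for item in years:
--         try:
--             value = int(float(item))
--         except (TypeError, ValueError):
--             continue
--         if value not in normalized:
--             normalized.append(value)
--     return sorted(normalized)
-- ===== SOURCE B (Python) =====
-- from typing import Any, Iterable, List
--
-- def _normalize_year_list(years: Iterable[Any]) -> List[int]:
--     vals: List[int] = []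
--     for item in years:
--         try:
--             vals.append(int(float(item)))
--         except (TypeError, ValueError):
--             continue
--     vals.sort()
--     result: List[int] = []
--     for v in vals:
--         if not result or result[-1] != v:
--             result.append(v)
--     return result
-- ===== Notes on version B (the rewrite author's own statement) =====
-- stated objective: faster
-- what changed: A dedupes with an O(n) membership test on the growing result before sorting; B collects all parsed values, sorts once, and dedupes in a single pass by comparing each value with the last one appended.
import Mathlib
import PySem

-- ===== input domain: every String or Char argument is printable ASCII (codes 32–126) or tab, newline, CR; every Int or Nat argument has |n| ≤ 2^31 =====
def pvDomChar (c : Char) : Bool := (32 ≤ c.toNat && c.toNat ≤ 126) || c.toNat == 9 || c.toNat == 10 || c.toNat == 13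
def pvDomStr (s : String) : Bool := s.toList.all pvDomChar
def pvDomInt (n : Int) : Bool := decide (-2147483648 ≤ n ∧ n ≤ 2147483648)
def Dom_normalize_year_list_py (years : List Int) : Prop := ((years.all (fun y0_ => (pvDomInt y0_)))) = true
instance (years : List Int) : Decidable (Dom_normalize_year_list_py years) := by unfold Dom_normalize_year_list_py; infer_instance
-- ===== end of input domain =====

-- B changes the algorithm: A dedupes with a membership scan before sorting (O(n^2));
-- B sorts first and dedupes adjacent duplicates in one pass (faster, O(n log n)).

-- ===== PORT A =====
-- on List Int, int(float(item)) always succeeds and returns item itself, so no try/except is needed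
def normalize_year_list_py (years : List Int) : List Int :=
  PySem.List.sorted
    (years.foldl (fun (normalized : List Int) item =>
      if item ∈ normalized then normalized else normalized ++ [item]) [])
    (fun x => x) false

-- ===== PORT B =====
def normalize_year_list_py_alt (years : List Int) : List Int :=
  let vals := PySem.List.sorted years (fun x => x) false
  vals.foldl (fun (result : List Int) v =>
    if result.getLast? = some v then result else result ++ [v]) []

-- ===== PRECONDITION & SPEC =====
def Spec_normalize_year_list_py (years : List Int) (out : List Int) : Prop := out = normalize_year_list_py_alt years
instance (years : List Int) (out : List Int) : Decidable (Spec_normalize_year_list_py years out) := by unfold Spec_normalize_year_list_py; infer_instance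

-- ===== CLAIM (what is proved, stated in full; the proofs are below) =====
def Claim_equal_normalize_year_list_py : Prop := ∀ (years : List Int), Dom_normalize_year_list_py years → Spec_normalize_year_list_py years (normalize_year_list_py years)

-- ===== LEMMAS AND PROOFS =====

-- proof-side characterisation of B's adjacent-dedup loop
def pvAdj : Option Int → List Int → List Int
  | _, [] => []
  | p, x :: xs => if p = some x then pvAdj p xs else x :: pvAdj (some x) xs

theorem pvAdj_foldl (s : List Int) : ∀ acc : List Int,
    s.foldl (fun (result : List Int) v =>
      if result.getLast? = some v then result else result ++ [v]) acc
      = acc ++ pvAdj acc.getLast? s := by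
  induction s with
  | nil => intro acc; simp [pvAdj]
  | cons x xs ih =>
    intro acc
    rw [List.foldl_cons]
    by_cases h : acc.getLast? = some x
    · rw [if_pos h, ih acc,
        show pvAdj acc.getLast? (x :: xs) = pvAdj acc.getLast? xs from by
          rw [h]; simp [pvAdj]]
    · rw [if_neg h, ih (acc ++ [x]), List.getLast?_concat,
        show pvAdj acc.getLast? (x :: xs) = x :: pvAdj (some x) xs from by
          simp [pvAdj, h]]
      simp

theorem pvAdj_mem (s : List Int) : ∀ p : Option Int,
    s.Pairwise (· ≤ ·) → (∀ y ∈ s, ∀ a, p = some a → a ≤ y) →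
    ∀ x, x ∈ pvAdj p s ↔ (x ∈ s ∧ some x ≠ p) := by
  induction s with
  | nil => intro p _ _ x; simp [pvAdj]
  | cons z zs ih =>
    intro p hpw hlb x
    have hz : ∀ y ∈ zs, z ≤ y := (List.pairwise_cons.mp hpw).1
    have hpw' := (List.pairwise_cons.mp hpw).2
    by_cases h : p = some z
    · subst h
      rw [show pvAdj (some z) (z :: zs) = pvAdj (some z) zs from by simp [pvAdj]]
      rw [ih (some z) hpw' (fun y hy a ha => by cases ha; exact hz y hy) x]
      constructor
      · rintro ⟨hx, hne⟩; exact ⟨List.mem_cons_of_mem _ hx, hne⟩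
      · rintro ⟨hx, hne⟩
        rcases List.mem_cons.mp hx with rfl | hx
        · exact absurd rfl hne
        · exact ⟨hx, hne⟩
    · simp only [pvAdj, if_neg h]
      rw [List.mem_cons, ih (some z) hpw' (fun y hy a ha => by cases ha; exact hz y hy) x]
      constructor
      · rintro (rfl | ⟨hx, hne⟩)
        · exact ⟨List.mem_cons_self, fun hc => h hc.symm⟩
        · refine ⟨List.mem_cons_of_mem _ hx, ?_⟩
          intro hc
          have hxz : x ≤ z := hlb z List.mem_cons_self x hc.symm
          have : x = z := le_antisymm hxz (hz x hx)
          subst this; exact hne rfl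
      · rintro ⟨hx, hne⟩
        rcases List.mem_cons.mp hx with rfl | hx
        · exact Or.inl rfl
        · by_cases hxz : x = z
          · exact Or.inl hxz
          · exact Or.inr ⟨hx, fun hc => hxz (Option.some.injEq .. ▸ hc)⟩

theorem pvAdj_pairwise (s : List Int) : ∀ p : Option Int,
    s.Pairwise (· ≤ ·) → (∀ y ∈ s, ∀ a, p = some a → a ≤ y) →
    (pvAdj p s).Pairwise (· < ·) := by
  induction s with
  | nil => intro p _ _; simp [pvAdj]
  | cons z zs ih =>
    intro p hpw hlb
    have hz : ∀ y ∈ zs, z ≤ y := (List.pairwise_cons.mp hpw).1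
    have hpw' := (List.pairwise_cons.mp hpw).2
    have hlb' : ∀ y ∈ zs, ∀ a, (some z : Option Int) = some a → a ≤ y :=
      fun y hy a ha => by cases ha; exact hz y hy
    by_cases h : p = some z
    · subst h
      simpa [pvAdj] using ih (some z) hpw' hlb'
    · simp only [pvAdj, if_neg h]
      refine List.pairwise_cons.mpr ⟨?_, ih (some z) hpw' hlb'⟩
      intro y hy
      have := (pvAdj_mem zs (some z) hpw' hlb' y).mp hy
      exact lt_of_le_of_ne (hz y this.1) (fun hc => this.2 (by rw [hc]))

-- A's dedup loop: membership and nodup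
theorem pvDedup_mem (ys : List Int) : ∀ acc : List Int, ∀ x,
    x ∈ ys.foldl (fun (n : List Int) item => if item ∈ n then n else n ++ [item]) acc
      ↔ x ∈ acc ∨ x ∈ ys := by
  induction ys with
  | nil => intro acc x; simp
  | cons z zs ih =>
    intro acc x
    simp only [List.foldl_cons]
    by_cases h : z ∈ acc
    · rw [if_pos h, ih]
      constructor
      · rintro (hx | hx); exacts [Or.inl hx, Or.inr (List.mem_cons_of_mem _ hx)]
      · rintro (hx | hx)
        · exact Or.inl hx
        · rcases List.mem_cons.mp hx with rfl | hx
          exacts [Or.inl h, Or.inr hx]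
    · rw [if_neg h, ih]
      simp [List.mem_cons, or_assoc, or_comm, or_left_comm]

theorem pvDedup_nodup (ys : List Int) : ∀ acc : List Int, acc.Nodup →
    (ys.foldl (fun (n : List Int) item => if item ∈ n then n else n ++ [item]) acc).Nodup := by
  induction ys with
  | nil => intro acc h; simpa
  | cons z zs ih =>
    intro acc hacc
    simp only [List.foldl_cons]
    by_cases h : z ∈ acc
    · rw [if_pos h]; exact ih acc hacc
    · rw [if_neg h]
      refine ih _ ?_
      simp only [List.nodup_append, List.nodup_cons, List.not_mem_nil, not_false_iff,
        List.nodup_nil, and_true, true_and]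
      exact ⟨hacc, fun a ha => by simp; exact fun hc => h (hc ▸ ha)⟩

-- ===== VERDICT (by name: the statement is the Claim_ definition above) =====
theorem normalize_year_list_py_spec : Claim_equal_normalize_year_list_py := by
  intro years _
  unfold Spec_normalize_year_list_py
  rw [show normalize_year_list_py_alt years
      = (PySem.List.sorted years (fun x => x) false).foldl
          (fun (result : List Int) v =>
            if result.getLast? = some v then result else result ++ [v]) [] from rfl]
  unfold normalize_year_list_py
  set d := years.foldl (fun (n : List Int) item => if item ∈ n then n else n ++ [item]) []
    with hd
  set s := PySem.List.sorted years (fun x => x) false with hs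
  have hsp : s.Pairwise (· ≤ ·) := by
    simpa using PySem.List.sorted_pairwise (xs := years) (key := fun x => x)
  have hlb : ∀ y ∈ s, ∀ a, (none : Option Int) = some a → a ≤ y := by
    intro y _ a ha; cases ha
  rw [pvAdj_foldl s []]
  simp only [List.nil_append, List.getLast?_nil]
  -- RHS := pvAdj none s; show sorted d = RHS via sorted_eq_of_perm_of_pairwise_lt
  have hmemR : ∀ x, x ∈ pvAdj none s ↔ x ∈ years := by
    intro x
    rw [pvAdj_mem s none hsp hlb x]
    have : x ∈ s ↔ x ∈ years := by
      simp [hs, PySem.List.mem_sorted]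
    simp [this]
  have hmemD : ∀ x, x ∈ d ↔ x ∈ years := by
    intro x; rw [hd, pvDedup_mem]; simp
  have hpwR : (pvAdj none s).Pairwise (· < ·) := pvAdj_pairwise s none hsp hlb
  have hndR : (pvAdj none s).Nodup := hpwR.imp (fun h => ne_of_lt h)
  have hndD : d.Nodup := pvDedup_nodup years [] (by simp)
  have hperm : (pvAdj none s).Perm d :=
    (List.perm_ext_iff_of_nodup hndR hndD).mpr (fun x => by rw [hmemR x, hmemD x])
  exact PySem.List.sorted_eq_of_perm_of_pairwise_lt d (pvAdj none s) (fun x => x)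
    hperm hpwR
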